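-- pv_equiv track=rewrite | github.com/vigetlabs/advent-of-code | albaer/day12/code.py | valid_part_2
-- ===== SOURCE A (Python) =====
-- from collections import Counter
--
-- def valid_part_2(path_list, cave):
--     small_caves = [cave for cave in path_list if cave.islower()]
--     already_visited_small_twice = [k for k, v in Counter(small_caves).items() if v > 1] != []
--     returning_to_small_cave = cave.islower() and cave in path_list
--     if cave == "start":
--         return False
--     elif already_visited_small_twice and returning_to_small_cave:
--         return False
--     else:
--         return True
-- ===== SOURCE B (Python) =====
-- def valid_part_2(path_list, cave):
--     if cave == "start":
--         return False
--     if not cave.islower() or cave not in path_list: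
--         return True
--     small = sorted(c for c in path_list if c.islower())
--     return all(x != y for x, y in zip(small, small[1:]))
-- ===== Notes on version B (the rewrite author's own statement) =====
-- stated objective: alternative
-- what changed: Guard clauses first (start / non-small / unvisited caves return immediately, skipping any scan); then duplicate small caves are detected by sorting the small caves and checking adjacent pairs for equality, instead of building a Counter over them and filtering its items for counts > 1.
import Mathlib
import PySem

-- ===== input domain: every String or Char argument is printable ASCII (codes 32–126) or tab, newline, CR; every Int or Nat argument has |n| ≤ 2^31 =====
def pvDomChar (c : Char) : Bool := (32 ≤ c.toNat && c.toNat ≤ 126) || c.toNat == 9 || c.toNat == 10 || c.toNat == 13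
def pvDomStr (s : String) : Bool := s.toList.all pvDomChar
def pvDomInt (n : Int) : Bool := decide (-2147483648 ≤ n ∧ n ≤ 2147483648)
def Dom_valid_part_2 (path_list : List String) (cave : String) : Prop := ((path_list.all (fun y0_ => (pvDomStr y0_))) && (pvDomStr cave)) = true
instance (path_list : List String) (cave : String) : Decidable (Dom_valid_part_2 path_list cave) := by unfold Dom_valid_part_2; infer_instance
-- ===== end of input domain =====

-- B replaces A's Counter-build-and-filter duplicate test with guard clauses plus
-- sort-the-small-caves-and-compare-adjacent-pairs (objective: alternative).


-- ===== PORT A =====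
-- s.islower() ported by hand (PySem has only the Char-level predicates): on the ASCII
-- domain it is "at least one lowercase letter and no uppercase letter" — exact there,
-- since the cased ASCII characters are exactly the letters.
def pyStrIslower (s : String) : Bool :=
  s.toList.any (fun c => PySem.Chars.islower c) && s.toList.all (fun c => !PySem.Chars.isupper c)

def valid_part_2 (path_list : List String) (cave : String) : Bool :=
  let small_caves := path_list.filter (fun c => pyStrIslower c)
  let already_visited_small_twice :=
    !((PySem.Dict.counter small_caves).items.filter (fun kv => decide (kv.2 > 1))).isEmpty
  let returning_to_small_cave := pyStrIslower cave && path_list.contains cave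
  if cave == "start" then false
  else if already_visited_small_twice && returning_to_small_cave then false
  else true

-- ===== PORT B =====
def valid_part_2_alt (path_list : List String) (cave : String) : Bool :=
  if cave == "start" then false
  else if !(pyStrIslower cave) || !(path_list.contains cave) then true
  else
    let small := PySem.List.sorted (path_list.filter (fun c => pyStrIslower c)) (fun x => x) false
    (small.zip small.tail).all (fun p => p.1 != p.2)

-- ===== PRECONDITION & SPEC =====
def Spec_valid_part_2 (path_list : List String) (cave : String) (out : Bool) : Prop := out = valid_part_2_alt path_list cave
instance (path_list : List String) (cave : String) (out : Bool) : Decidable (Spec_valid_part_2 path_list cave out) := by unfold Spec_valid_part_2; infer_instance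

-- ===== CLAIM (what is proved, stated in full; the proofs are below) =====
def Claim_equal_valid_part_2 : Prop := ∀ (path_list : List String) (cave : String), Dom_valid_part_2 path_list cave → Spec_valid_part_2 path_list cave (valid_part_2 path_list cave)

-- ===== LEMMAS AND PROOFS =====

-- on a (weakly) sorted list, "no adjacent pair is equal" is exactly Nodup
theorem adj_ne_iff_nodup (l : List String) (h : l.Pairwise (· ≤ ·)) :
    ((l.zip l.tail).all (fun p => p.1 != p.2) = true) ↔ l.Nodup := by
  induction l with
  | nil => simp
  | cons a t ih =>
    cases t with
    | nil => simp
    | cons b t' =>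
      rw [List.pairwise_cons] at h
      obtain ⟨hle, hrest⟩ := h
      have ih' := ih hrest
      simp only [List.tail_cons, List.zip_cons_cons, List.all_cons, Bool.and_eq_true,
        bne_iff_ne, ne_eq, List.nodup_cons] at ih' ⊢
      constructor
      · rintro ⟨hab, hr⟩
        have hnd := ih'.mp hr
        refine ⟨?_, hnd⟩
        intro hmem
        rcases List.mem_cons.mp hmem with rfl | hmem'
        · exact hab rfl
        · have h1 : a ≤ b := hle b (List.mem_cons_self ..)
          have h2 : b ≤ a := (List.pairwise_cons.mp hrest).1 a hmem'
          exact hab (le_antisymm h1 h2)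
      · rintro ⟨hnm, hnd⟩
        exact ⟨fun hab => hnm (hab ▸ List.mem_cons_self ..), ih'.mpr hnd⟩

-- A's Counter-items filter is nonempty iff the small caves contain a duplicate
theorem counter_filter_nonempty_iff (l : List String) :
    (((PySem.Dict.counter l).items.filter (fun kv => decide (kv.2 > 1))).isEmpty = false) ↔ ¬ l.Nodup := by
  rw [PySem.Dict.items_counter, List.isEmpty_eq_false_iff, ne_eq, List.filter_eq_nil_iff]
  push_neg
  constructor
  · rintro ⟨kv, hmem, hgt⟩
    obtain ⟨k, hk, rfl⟩ := List.mem_map.mp hmem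
    simp only [decide_eq_true_eq] at hgt
    intro hn
    have h1 := List.nodup_iff_count_le_one.mp hn k
    have h2 : (l.count k : Int) ≤ 1 := by exact_mod_cast h1
    omega
  · intro hnd
    rw [List.nodup_iff_count_le_one] at hnd
    push_neg at hnd
    obtain ⟨k, hk⟩ := hnd
    refine ⟨(k, (l.count k : Int)),
      List.mem_map.mpr ⟨k, ((PySem.Set.mem_ofList l k).mpr (List.count_pos_iff.mp (by omega))), rfl⟩, ?_⟩
    simp only [decide_eq_true_eq]
    exact_mod_cast hk

-- ===== VERDICT (by name: the statement is the Claim_ definition above) =====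
theorem valid_part_2_spec : Claim_equal_valid_part_2 := by
  intro path_list cave _
  unfold Spec_valid_part_2 valid_part_2 valid_part_2_alt
  by_cases hs : cave == "start"
  · simp [hs]
  · by_cases hl : pyStrIslower cave = true
    · by_cases hm : path_list.contains cave = true
      · -- all guards pass: compare the duplicate tests themselves
        have hsp := PySem.List.sorted_pairwise
          (xs := path_list.filter (fun c => pyStrIslower c)) (key := fun x => x)
        have hperm := PySem.List.sorted_perm
          (xs := path_list.filter (fun c => pyStrIslower c)) (key := fun x => x) (rev := false)
        have hiff :
            ((let small := PySem.List.sorted (path_list.filter (fun c => pyStrIslower c)) (fun x => x) false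
              (small.zip small.tail).all (fun p => p.1 != p.2)) = true) ↔
              (path_list.filter (fun c => pyStrIslower c)).Nodup := by
          rw [adj_ne_iff_nodup _ hsp, hperm.nodup_iff]
        cases hE : ((PySem.Dict.counter (List.filter (fun c => pyStrIslower c) path_list)).items.filter
            (fun kv => decide (kv.2 > 1))).isEmpty with
        | true =>
          have hnd : (path_list.filter (fun c => pyStrIslower c)).Nodup := by
            by_contra hc
            rw [(counter_filter_nonempty_iff _).mpr hc] at hE
            cases hE
          simp only [hs, hl, hm]
          simp [hE, hiff.mpr hnd]
        | false =>
          have hnd := (counter_filter_nonempty_iff _).mp hE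
          have hB : (let small := PySem.List.sorted (path_list.filter (fun c => pyStrIslower c)) (fun x => x) false
              (small.zip small.tail).all (fun p => p.1 != p.2)) = false := by
            cases hcase : (let small := PySem.List.sorted (path_list.filter (fun c => pyStrIslower c)) (fun x => x) false
              (small.zip small.tail).all (fun p => p.1 != p.2)) with
            | false => rfl
            | true => exact absurd (hiff.mp hcase) hnd
          simp only [hs, hl, hm]
          simp [hE] at hB ⊢
          exact hB
      · have hm' : cave ∉ path_list := by simpa using hm
        simp [hs, hl, hm']
    · have hl' : pyStrIslower cave = false := by simp_all
      simp [hs, hl']
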